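-- pv_equiv track=rewrite | github.com/lu1um/TIL | kakao/괄호변환.py | solution
-- ===== SOURCE A (Python) =====
-- def solution(p):
--     if not p:
--         return ''
--     w = list(p)
--     length = len(w)
--     left = 0
--     right = 0
--     opened = 0
--     idx = 0
--     while left != right or left == 0 or right == 0 :
--         if w[idx] == '(':
--             left += 1
--             opened += 1
--         else:
--             right += 1
--             if opened:
--                 opened -=1
--         idx += 1
--         if idx == length:
--             break
--     if opened == 0:
--         return p[:idx] + solution(p[idx:])
--     else:
--         u = '(' + solution(p[idx:]) + ')'   # ( + v + )
--         for bracket in w[1:idx-1]: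
--             if bracket == '(':
--                 u += ')'
--             else:
--                 u += '('
--         return u
-- ===== SOURCE B (Python) =====
-- def solution(p):
--     # Same counting loop as A, but used once per segment to carve p into
--     # an ordered list of balanced chunks, then folded back-to-front
--     # instead of recursing.
--     def cut(s):
--         left = right = opened = idx = 0
--         n = len(s)
--         while left != right or left == 0 or right == 0:
--             if s[idx] == '(':
--                 left += 1
--                 opened += 1
--             else:
--                 right += 1
--                 if opened:
--                     opened -= 1
--             idx += 1
--             if idx == n:
--                 break
--         return idx, opened
--
--     segs = []
--     rest = p
--     while rest:
--         idx, opened = cut(rest)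
--         segs.append((rest[:idx], opened == 0))
--         rest = rest[idx:]
--
--     res = ''
--     for seg, ok in reversed(segs):
--         if ok:
--             res = seg + res
--         else:
--             res = '(' + res + ')' + ''.join(
--                 ')' if c == '(' else '(' for c in seg[1:-1])
--     return res
-- ===== Notes on version B (the rewrite author's own statement) =====
-- stated objective: alternative
-- what changed: B keeps A's idiosyncratic counting loop only to carve p into an ordered list of (segment, correct?) chunks in one pass, then builds the result by folding that list back-to-front into an accumulator string, replacing A's right-recursion over the remainder.
import Mathlib
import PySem

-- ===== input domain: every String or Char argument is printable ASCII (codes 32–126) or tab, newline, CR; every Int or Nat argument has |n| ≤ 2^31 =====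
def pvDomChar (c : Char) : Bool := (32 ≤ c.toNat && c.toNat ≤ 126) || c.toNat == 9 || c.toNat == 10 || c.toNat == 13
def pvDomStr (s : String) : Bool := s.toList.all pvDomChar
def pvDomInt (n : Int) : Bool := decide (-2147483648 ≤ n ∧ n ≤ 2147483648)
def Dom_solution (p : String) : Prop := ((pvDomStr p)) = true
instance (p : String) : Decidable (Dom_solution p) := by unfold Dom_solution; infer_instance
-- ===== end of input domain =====

-- B replaces A's recursion over balanced chunks by an explicit segmentation
-- pass followed by a back-to-front fold over the segment list (objective:
-- alternative decomposition, same counting loop, same cost).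

-- ===== PORT A =====
-- A's while loop: counters left/right/opened are nonnegative ints compared to 0,
-- idx a nonnegative index; ported with Nat counters (exact, since they never go
-- below 0: opened's decrement is guarded). Returns (idx, opened).
def aLoop : List Char → Nat → Nat → Nat → Nat → Nat × Nat
  | cs, left, right, opened, idx =>
    if left ≠ right ∨ left = 0 ∨ right = 0 then
      match cs with
      | [] => (idx, opened)          -- idx == length: break
      | c :: rest =>
        if c = '(' then aLoop rest (left + 1) right (opened + 1) (idx + 1)
        else aLoop rest left (right + 1) (if opened ≠ 0 then opened - 1 else opened) (idx + 1)
    else (idx, opened)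

-- (idx, opened) = aLoop never moves idx backwards
theorem aLoop_idx_ge : ∀ (cs : List Char) (l r o i : Nat), i ≤ (aLoop cs l r o i).1 := by
  intro cs
  induction cs with
  | nil => intro l r o i; rw [aLoop]; split <;> simp
  | cons c rest ih =>
    intro l r o i
    rw [aLoop]
    split
    · split
      · exact le_trans (Nat.le_succ i) (ih _ _ _ _)
      · exact le_trans (Nat.le_succ i) (ih _ _ _ _)
    · simp

theorem aLoop_start_pos (c : Char) (rest : List Char) :
    1 ≤ (aLoop (c :: rest) 0 0 0 0).1 := by
  rw [aLoop]
  simp only [ne_eq, not_true_eq_false, or_true, if_true]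
  split
  · exact le_trans (by omega) (aLoop_idx_ge _ _ _ _ _)
  · exact le_trans (by omega) (aLoop_idx_ge _ _ _ _ _)

-- A's recursion, on the char list (p[:idx] = take idx, p[idx:] = drop idx:
-- exact, idx is a nonnegative in-range index; w[1:idx-1] = drop 1 of take (idx-1)).
def aGo (w : List Char) : List Char :=
  match h : w with
  | [] => []
  | c :: rest =>
    let t := aLoop (c :: rest) 0 0 0 0
    let idx := t.1
    let opened := t.2
    if opened = 0 then
      w.take idx ++ aGo (w.drop idx)
    else
      ('(' :: aGo (w.drop idx) ++ [')'])
        ++ ((w.take (idx - 1)).drop 1).map (fun b => if b = '(' then ')' else '(')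
  termination_by w.length
  decreasing_by
    all_goals
      simp only [h, List.length_drop, List.length_cons]
      have := aLoop_start_pos c rest
      omega

def solution (p : String) : String := String.ofList (aGo p.toList)

-- ===== PORT B =====
-- B's cut(): same counting loop, written as its own helper.
def bCut : List Char → Nat → Nat → Nat → Nat → Nat × Nat
  | cs, left, right, opened, idx =>
    if left ≠ right ∨ left = 0 ∨ right = 0 then
      match cs with
      | [] => (idx, opened)
      | c :: rest =>
        if c = '(' then bCut rest (left + 1) right (opened + 1) (idx + 1)
        else bCut rest left (right + 1) (if opened ≠ 0 then opened - 1 else opened) (idx + 1)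
    else (idx, opened)

theorem bCut_eq_aLoop : ∀ (cs : List Char) (l r o i : Nat),
    bCut cs l r o i = aLoop cs l r o i := by
  intro cs
  induction cs with
  | nil => intro l r o i; rw [bCut, aLoop]
  | cons c rest ih =>
    intro l r o i
    rw [bCut, aLoop]
    simp only [ih]

-- B's segmentation loop: carve p into (segment, correct?) pairs.
def bSegs (w : List Char) : List (List Char × Bool) :=
  match h : w with
  | [] => []
  | c :: rest =>
    let t := bCut (c :: rest) 0 0 0 0
    (w.take t.1, t.2 == 0) :: bSegs (w.drop t.1)
  termination_by w.length
  decreasing_by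
    simp only [h, List.length_drop, List.length_cons, bCut_eq_aLoop]
    have := aLoop_start_pos c rest
    omega

-- B's reverse pass: 'for seg, ok in reversed(segs)' accumulating res,
-- ported as a right fold over the segment list.
def bStep (e : List Char × Bool) (res : List Char) : List Char :=
  if e.2 then e.1 ++ res
  else ('(' :: res ++ [')'])
        ++ (e.1.drop 1).dropLast.map (fun c => if c = '(' then ')' else '(')

def solution_alt (p : String) : String :=
  String.ofList ((bSegs p.toList).foldr bStep [])

-- ===== PRECONDITION & SPEC =====
def Spec_solution (p : String) (out : String) : Prop := out = solution_alt p
instance (p : String) (out : String) : Decidable (Spec_solution p out) := by unfold Spec_solution; infer_instance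

-- ===== CLAIM (what is proved, stated in full; the proofs are below) =====
def Claim_equal_solution : Prop := ∀ (p : String), Dom_solution p → Spec_solution p (solution p)

-- ===== LEMMAS AND PROOFS =====

-- idx never exceeds i + remaining length
theorem aLoop_idx_le : ∀ (cs : List Char) (l r o i : Nat), (aLoop cs l r o i).1 ≤ i + cs.length := by
  intro cs
  induction cs with
  | nil => intro l r o i; rw [aLoop]; split <;> simp
  | cons c rest ih =>
    intro l r o i
    rw [aLoop]
    split
    · split
      · exact le_trans (ih _ _ _ _) (by simp [List.length_cons]; omega)
      · exact le_trans (ih _ _ _ _) (by simp [List.length_cons]; omega)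
    · simp


-- seg[1:-1] of seg = w.take idx equals w[1:idx-1] when idx ≤ |w|
theorem take_slice_eq (w : List Char) (idx : Nat) (h : idx ≤ w.length) :
    ((w.take idx).drop 1).dropLast = (w.take (idx - 1)).drop 1 := by
  rw [List.drop_take, List.dropLast_eq_take, List.take_take, List.drop_take]
  congr 1
  simp only [List.length_take, List.length_drop]
  omega

theorem aGo_eq_fold : (w : List Char) → aGo w = (bSegs w).foldr bStep []
  | [] => by rw [aGo, bSegs]; rfl
  | c :: rest => by
    have hlen := aLoop_idx_le (c :: rest) 0 0 0 0
    have hpos := aLoop_start_pos c rest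
    have ih := aGo_eq_fold ((c :: rest).drop (aLoop (c :: rest) 0 0 0 0).1)
    rw [aGo, bSegs, bCut_eq_aLoop]
    simp only [List.foldr_cons, ← ih]
    by_cases ho : (aLoop (c :: rest) 0 0 0 0).2 = 0
    · simp [bStep, ho]
    · simp only [bStep, ho, beq_iff_eq, if_false]
      rw [take_slice_eq _ _ (by simpa using hlen)]
  termination_by w => w.length
  decreasing_by
    simp only [List.length_drop, List.length_cons]
    have := aLoop_start_pos c rest
    omega

theorem solution_eq (p : String) : solution p = solution_alt p := by
  unfold solution solution_alt
  rw [aGo_eq_fold]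

-- ===== VERDICT (by name: the statement is the Claim_ definition above) =====
theorem solution_spec : Claim_equal_solution := by
  intro p _
  unfold Spec_solution
  exact solution_eq p
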